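-- pv_equiv track=rewrite | github.com/gabriellaec/desoft-analise-exercicios | backup/user_270/ch47_2020_04_12_21_29_17_460000.py | estritamente_crescente
-- ===== SOURCE A (Python) =====
-- def estritamente_crescente(lista):
--     newLista= []
--     index=0
--     if lista:
--         newLista.append(lista[0])
--     for i in lista:
--         if i>newLista[index]:
--             newLista.append(i)
--             index +=1
--     return newLista
-- ===== SOURCE B (Python) =====
-- def estritamente_crescente(lista):
--     if not lista:
--         return []
--     maxes = []
--     m = lista[0]
--     for x in lista:
--         m = m if m > x else x
--         maxes.append(m)
--     return [lista[0]] + [x for x, p in zip(lista[1:], maxes) if x > p]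
-- ===== Notes on version B (the rewrite author's own statement) =====
-- stated objective: alternative
-- what changed: Replaced A's single greedy scan that appends to the result and indexes its last element with a two-pass shape: first build a running prefix-maximum table, then select the first element plus every element strictly exceeding the previous table entry via zip+comprehension.
import Mathlib
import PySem

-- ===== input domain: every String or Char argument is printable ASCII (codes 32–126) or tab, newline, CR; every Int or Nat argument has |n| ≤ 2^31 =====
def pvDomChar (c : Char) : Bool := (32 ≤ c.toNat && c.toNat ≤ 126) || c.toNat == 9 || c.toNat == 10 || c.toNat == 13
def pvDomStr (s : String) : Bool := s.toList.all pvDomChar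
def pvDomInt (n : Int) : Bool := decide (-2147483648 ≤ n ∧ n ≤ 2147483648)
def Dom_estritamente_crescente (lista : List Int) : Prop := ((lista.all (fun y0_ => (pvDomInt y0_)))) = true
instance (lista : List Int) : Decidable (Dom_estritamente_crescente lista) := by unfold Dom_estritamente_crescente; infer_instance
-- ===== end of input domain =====

-- B keeps the same return value via a prefix-max table + filter pass instead of A's greedy append-and-index scan.

-- ===== PORT A =====
-- newLista[index]: the loop keeps 0 ≤ index = len(newLista)-1, so the index is always
-- in range and getD with toNat is exact here (Python never raises / wraps on it).
def estritamente_crescente (lista : List Int) : List Int :=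
  let init : List Int × Int :=
    match lista with
    | [] => ([], 0)
    | x :: _ => ([x], 0)
  (lista.foldl (fun (st : List Int × Int) i =>
      if i > st.1.getD st.2.toNat 0 then (st.1 ++ [i], st.2 + 1) else st) init).1

-- ===== PORT B =====
def estritamente_crescente_alt (lista : List Int) : List Int :=
  match lista with
  | [] => []
  | x0 :: _ =>
    let maxes := (lista.foldl (fun (st : Int × List Int) x =>
        let m := if st.1 > x then st.1 else x
        (m, st.2 ++ [m])) (x0, ([] : List Int))).2
    x0 :: ((lista.drop 1).zip maxes).filterMap
      (fun p => if p.1 > p.2 then some p.1 else none)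

-- ===== PRECONDITION & SPEC =====
def Spec_estritamente_crescente (lista : List Int) (out : List Int) : Prop := out = estritamente_crescente_alt lista
instance (lista : List Int) (out : List Int) : Decidable (Spec_estritamente_crescente lista out) := by unfold Spec_estritamente_crescente; infer_instance

-- ===== CLAIM (what is proved, stated in full; the proofs are below) =====
def Claim_equal_estritamente_crescente : Prop := ∀ (lista : List Int), Dom_estritamente_crescente lista → Spec_estritamente_crescente lista (estritamente_crescente lista)

-- ===== LEMMAS AND PROOFS =====

-- reference recursion: elements strictly above the running maximum m
def pvLim (m : Int) : List Int → List Int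
  | [] => []
  | x :: xs => if x > m then x :: pvLim x xs else pvLim m xs

-- prefix-maximum list starting from m
def pvPm (m : Int) : List Int → List Int
  | [] => []
  | x :: xs => (if m > x then m else x) :: pvPm (if m > x then m else x) xs

-- A's fold, characterised
theorem pvA_fold (xs : List Int) : ∀ (acc : List Int) (m : Int),
    (xs.foldl (fun (st : List Int × Int) i =>
      if i > st.1.getD st.2.toNat 0 then (st.1 ++ [i], st.2 + 1) else st)
      (acc ++ [m], (acc.length : Int))).1 = acc ++ [m] ++ pvLim m xs := by
  induction xs with
  | nil => intro acc m; simp [pvLim]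
  | cons x xs ih =>
    intro acc m
    have hget : (acc ++ [m]).getD (acc.length : Int).toNat 0 = m := by
      simp
    simp only [List.foldl, hget, pvLim]
    by_cases h : x > m
    · simp only [if_pos h]
      have h1 : (acc.length : Int) + 1 = (((acc ++ [m]).length : Nat) : Int) := by
        simp
      have := ih (acc ++ [m]) x
      rw [h1]
      simp only [List.append_assoc] at this ⊢
      exact this
    · simp only [if_neg h]
      exact ih acc m

-- B's fold, characterised
theorem pvB_fold (xs : List Int) : ∀ (m : Int) (acc : List Int),
    (xs.foldl (fun (st : Int × List Int) x =>
      ((if st.1 > x then st.1 else x), st.2 ++ [if st.1 > x then st.1 else x]))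
      (m, acc)).2 = acc ++ pvPm m xs := by
  induction xs with
  | nil => intro m acc; simp [pvPm]
  | cons x xs ih =>
    intro m acc
    simp only [List.foldl, pvPm]
    rw [ih]
    simp

-- the zip-filter pass equals the reference recursion
theorem pvZip_filter (xs : List Int) : ∀ (m : Int),
    ((xs.zip (m :: pvPm m xs)).filterMap
      (fun p => if p.1 > p.2 then some p.1 else none)) = pvLim m xs := by
  induction xs with
  | nil => intro m; rfl
  | cons x xs ih =>
    intro m
    simp only [pvPm, List.zip_cons_cons, List.filterMap_cons, pvLim]
    by_cases h : x > m
    · have hm : (if m > x then m else x) = x := by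
        have : ¬ m > x := by omega
        simp [this]
      rw [hm]
      simp only [if_pos h, ih]
    · have hm : (if m > x then m else x) = m := by
        by_cases h2 : m > x
        · simp [h2]
        · have : m = x := by omega
          simp [this]
      rw [hm]
      simp only [if_neg h, ih]

theorem pvA_eval (lista : List Int) :
    estritamente_crescente lista = match lista with
      | [] => []
      | x :: xs => x :: pvLim x xs := by
  cases lista with
  | nil => rfl
  | cons x xs =>
    show (List.foldl _ ([x], (0 : Int)) (x :: xs)).1 = x :: pvLim x xs
    simp only [List.foldl]
    have h0 : ([x].getD (0 : Int).toNat 0) = x := by simp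
    rw [h0]
    have : ¬ x > x := lt_irrefl x
    simp only [if_neg this]
    have := pvA_fold xs [] x
    simpa using this

theorem pvB_eval (lista : List Int) :
    estritamente_crescente_alt lista = match lista with
      | [] => []
      | x :: xs => x :: pvLim x xs := by
  cases lista with
  | nil => rfl
  | cons x xs =>
    show (x :: ((List.drop 1 (x :: xs)).zip
        ((List.foldl _ (x, ([] : List Int)) (x :: xs)).2)).filterMap _) = x :: pvLim x xs
    have hfold : (List.foldl (fun (st : Int × List Int) y =>
        ((if st.1 > y then st.1 else y), st.2 ++ [if st.1 > y then st.1 else y]))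
        (x, ([] : List Int)) (x :: xs)).2 = pvPm x (x :: xs) := by
      simpa using pvB_fold (x :: xs) x []
    rw [hfold]
    have hx : pvPm x (x :: xs) = x :: pvPm x xs := by
      simp [pvPm]
    rw [hx]
    simp only [List.drop_one, List.tail_cons]
    rw [pvZip_filter xs x]

-- ===== VERDICT (by name: the statement is the Claim_ definition above) =====
theorem estritamente_crescente_spec : Claim_equal_estritamente_crescente := by
  intro lista _
  unfold Spec_estritamente_crescente
  rw [pvA_eval, pvB_eval]
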